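-- pv_equiv track=rewrite | github.com/sfujita0601/FourFeatureHumanOGTT | python/lib/helper/Fig6Heler.py | check
-- ===== SOURCE A (Python) =====
-- def check(lst):
--     first = lst[0]
--     second = lst[1]
--     Idx=[]#重複してる箇所
--     count=1#リスト中の3こ以上連続するとこは両端のみ残すようにする
--     for num in lst[2:]:
--         if (num == first) and (first == second):#3つ同じなら
--             Idx.append(count)
--         count += 1
--         first = second
--         second = num
--     return Idx
-- ===== SOURCE B (Python) =====
-- def check(lst):
--     # Run-based: partition lst into maximal runs of consecutive equal
--     # elements; the interior indices of each run are exactly the middles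
--     # of 3-in-a-row windows.
--     Idx = []
--     n = len(lst)
--     i = 0
--     while i < n:
--         j = i + 1
--         while j < n and lst[j] == lst[i]:
--             j += 1
--         Idx.extend(range(i + 1, j - 1))
--         i = j
--     return Idx
-- ===== Notes on version B (the rewrite author's own statement) =====
-- stated objective: alternative
-- what changed: Replaced the 3-element sliding window (rolling first/second state over lst[2:]) by a run-partitioning scan: find each maximal run of consecutive equal elements with an inner while loop and extend the result with the run's interior index range.
-- outside the precondition, e.g. on check([0]): A raises IndexError, B returns []; on check([]): A raises IndexError, B returns []; on check([1]): A raises IndexError, B returns []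
import Mathlib
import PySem

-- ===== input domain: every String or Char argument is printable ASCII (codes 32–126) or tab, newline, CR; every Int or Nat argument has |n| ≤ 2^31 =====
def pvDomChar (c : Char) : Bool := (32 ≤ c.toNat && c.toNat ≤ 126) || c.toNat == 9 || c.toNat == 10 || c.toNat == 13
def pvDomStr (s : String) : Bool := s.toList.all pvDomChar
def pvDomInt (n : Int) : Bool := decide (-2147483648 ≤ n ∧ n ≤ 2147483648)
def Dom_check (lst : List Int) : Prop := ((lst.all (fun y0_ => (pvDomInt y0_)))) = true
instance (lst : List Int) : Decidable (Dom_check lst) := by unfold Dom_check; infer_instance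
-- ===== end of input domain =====

-- B replaces A's 3-element sliding window by a maximal-run partition scan (alternative decomposition, same O(n) cost).

-- ===== PORT A =====
-- the for-loop over lst[2:] with rolling state (first, second, count, Idx)
def checkLoop (rest : List Int) (first second : Int) (count : Int) (idx : List Int) : List Int :=
  match rest with
  | [] => idx
  | num :: t =>
      checkLoop t second num (count + 1)
        (if num = first ∧ first = second then idx ++ [count] else idx)

def check (lst : List Int) : List Int :=
  match lst with
  | a :: b :: rest => checkLoop rest a b 1 []   -- first = lst[0], second = lst[1]
  | _ => []                                      -- Python raises IndexError here (outside Pre_)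

-- ===== PORT B =====
-- inner while: number of leading elements of xs equal to v (j - i - 1 in Source B)
def altInner (xs : List Int) (v : Int) : Nat :=
  match xs with
  | [] => 0
  | x :: t => if x = v then altInner t v + 1 else 0

-- outer while over suffixes of lst: i is the absolute index of the suffix head;
-- fuel = lst.length bounds the number of outer iterations (each consumes >= 1 element)
def altOuter (fuel : Nat) (lst : List Int) (i : Int) : List Int :=
  match fuel, lst with
  | _, [] => []
  | 0, _ :: _ => []
  | fuel + 1, x :: t =>
      let m := altInner t x
      let j := i + 1 + (m : Int)
      PySem.List.pyRange (i + 1) (j - 1) 1 ++ altOuter fuel (t.drop m) j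

def check_alt (lst : List Int) : List Int := altOuter lst.length lst 0

-- ===== PRECONDITION & SPEC =====
-- A reads lst[0] and lst[1] unconditionally and raises IndexError when len(lst) < 2; Pre_ excludes exactly those inputs (B returns [] there).
def Pre_check (lst : List Int) : Prop := 2 ≤ lst.length
instance (lst : List Int) : Decidable (Pre_check lst) := by unfold Pre_check; infer_instance
def pvWitness_check : List Int := [4, 4, 4, 7]

def Spec_check (lst : List Int) (out : List Int) : Prop := out = check_alt lst
instance (lst : List Int) (out : List Int) : Decidable (Spec_check lst out) := by unfold Spec_check; infer_instance

-- ===== CLAIM (what is proved, stated in full; the proofs are below) =====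
def Claim_equal_check : Prop := ∀ (lst : List Int), Dom_check lst → Pre_check lst → Spec_check lst (check lst)

-- ===== LEMMAS AND PROOFS =====

-- reference function: windows of 3, indexed from i
def w : List Int → Int → List Int
  | a :: b :: c :: t, i => (if c = a ∧ a = b then [i + 1] else []) ++ w (b :: c :: t) (i + 1)
  | _, _ => []

lemma checkLoop_eq_w (rest : List Int) : ∀ (a b i : Int) (idx : List Int),
    checkLoop rest a b (i + 1) idx = idx ++ w (a :: b :: rest) i := by
  induction rest with
  | nil => intro a b i idx; simp [checkLoop, w]
  | cons c t ih =>
      intro a b i idx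
      show checkLoop t b c ((i + 1) + 1) _ = _
      have : (i + 1) + 1 = (i + 1) + 1 := rfl
      rw [ih b c (i + 1)]
      simp only [w]
      split_ifs with h <;> simp

-- the run lemma: w over a maximal run decomposes into its interior range
lemma w_run (t : List Int) : ∀ (x : Int) (i : Int),
    w (x :: t) i =
      PySem.List.pyRange (i + 1) (i + (altInner t x : Int)) 1 ++
        w (t.drop (altInner t x)) (i + 1 + (altInner t x : Int)) := by
  induction t with
  | nil =>
      intro x i
      rw [PySem.List.pyRange_one_eq_nil (by simp [altInner])]
      simp [w, altInner]
  | cons y t' ih =>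
      intro x i
      by_cases hxy : y = x
      · subst hxy
        have hm : altInner (y :: t') y = altInner t' y + 1 := by simp [altInner]
        rw [hm]
        cases t' with
        | nil =>
            rw [show altInner ([] : List Int) y = 0 from rfl]
            rw [PySem.List.pyRange_one_eq_nil (by push_cast; omega)]
            simp [w]
        | cons c t'' =>
            have ih' := ih y (i + 1)
            by_cases hc : c = y
            · -- window (y,y,c) fires: contributes i+1
              have hm' : 1 ≤ altInner (c :: t'') y := by simp [altInner, hc]
              show (if c = y ∧ y = y then [i + 1] else []) ++ w (y :: c :: t'') (i + 1) = _
              rw [if_pos ⟨hc, rfl⟩, ih']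
              push_cast
              rw [PySem.List.pyRange_one_cons (show i + 1 < i + ((altInner (c :: t'') y : Int) + 1) by omega)]
              simp only [List.drop_succ_cons, List.cons_append, List.nil_append]
              rw [show i + ((altInner (c :: t'') y : Int) + 1) = i + 1 + (altInner (c :: t'') y : Int) from by ring,
                  show i + 1 + ((altInner (c :: t'') y : Int) + 1) = i + 1 + 1 + (altInner (c :: t'') y : Int) from by ring]
            · -- run of length 2 ends at c
              have hm0 : altInner (c :: t'') y = 0 := by simp [altInner, hc]
              show (if c = y ∧ y = y then [i + 1] else []) ++ w (y :: c :: t'') (i + 1) = _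
              rw [if_neg (by simp [hc]), ih', hm0]
              rw [PySem.List.pyRange_one_eq_nil (by push_cast; omega)]
              rw [PySem.List.pyRange_one_eq_nil (by push_cast; omega)]
              simp
      · -- run has length 1: altInner = 0, the first window cannot fire
        have hm0 : altInner (y :: t') x = 0 := by simp [altInner, hxy]
        rw [hm0]
        rw [PySem.List.pyRange_one_eq_nil (by push_cast; omega)]
        simp only [List.drop, Int.natCast_zero, List.nil_append, add_zero]
        cases t' with
        | nil => simp [w]
        | cons c t'' =>
            show (if c = x ∧ x = y then [i + 1] else []) ++ w (y :: c :: t'') (i + 1) = _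
            rw [if_neg (by intro h; exact hxy h.2.symm)]
            simp

lemma altOuter_eq_w : ∀ (fuel : Nat) (lst : List Int), lst.length ≤ fuel → ∀ i, altOuter fuel lst i = w lst i := by
  intro fuel
  induction fuel with
  | zero =>
      intro lst hl i
      have : lst = [] := List.eq_nil_of_length_eq_zero (by omega)
      subst this; rfl
  | succ n ih =>
      intro lst hl i
      cases lst with
      | nil => rfl
      | cons x t =>
          show PySem.List.pyRange (i + 1) (i + 1 + (altInner t x : Int) - 1) 1 ++
              altOuter n (t.drop (altInner t x)) (i + 1 + (altInner t x : Int)) = _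
          have hd : (t.drop (altInner t x)).length ≤ n := by
            simp at hl ⊢; omega
          rw [ih _ hd, w_run t x i]
          congr 2
          ring

-- ===== VERDICT (by name: the statement is the Claim_ definition above) =====
theorem check_spec : Claim_equal_check := by
  intro lst _ hpre
  unfold Spec_check check_alt
  match lst, hpre with
  | a :: b :: rest, _ =>
      show check (a :: b :: rest) = _
      rw [show check (a :: b :: rest) = checkLoop rest a b 1 [] from rfl]
      rw [show (1 : Int) = 0 + 1 from rfl, checkLoop_eq_w rest a b 0 []]
      rw [altOuter_eq_w (a :: b :: rest).length _ le_rfl]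
      simp
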